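-- pv_equiv track=rewrite | github.com/KaguraTart/air-network-planning | src/Final/3_performance_analysis.py | detect_collisions
-- ===== SOURCE A (Python) =====
-- def detect_collisions(all_paths):
--     occupancy = {}
--     collisions = 0
--     crashed_ids = set()
--     for drone_id, path in enumerate(all_paths):
--         if not path: continue
--         for node, t in path:
--             key = (node, int(t))
--             if key in occupancy:
--                 collisions += 1
--                 crashed_ids.add(drone_id); crashed_ids.add(occupancy[key])
--             occupancy[key] = drone_id
--     return collisions, len(crashed_ids)
-- ===== SOURCE B (Python) =====
-- def detect_collisions(all_paths):
--     groups = {}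
--     for drone_id, path in enumerate(all_paths):
--         if not path: continue
--         for node, t in path:
--             groups.setdefault((node, int(t)), []).append(drone_id)
--     collisions = 0
--     crashed_ids = set()
--     for ids in groups.values():
--         collisions += len(ids) - 1
--         if len(ids) > 1:
--             crashed_ids.update(ids)
--     return collisions, len(crashed_ids)
-- ===== Notes on version B (the rewrite author's own statement) =====
-- stated objective: alternative
-- what changed: Instead of a single streaming pass that tracks the last occupant per (node,t) and updates collision count and crashed set on each repeat, B first groups all drone ids per (node,t) key into a dict of lists, then in a second pass derives collisions as sum of (group size - 1) and crashed drones as the union of all groups of size >= 2.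
import Mathlib
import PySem

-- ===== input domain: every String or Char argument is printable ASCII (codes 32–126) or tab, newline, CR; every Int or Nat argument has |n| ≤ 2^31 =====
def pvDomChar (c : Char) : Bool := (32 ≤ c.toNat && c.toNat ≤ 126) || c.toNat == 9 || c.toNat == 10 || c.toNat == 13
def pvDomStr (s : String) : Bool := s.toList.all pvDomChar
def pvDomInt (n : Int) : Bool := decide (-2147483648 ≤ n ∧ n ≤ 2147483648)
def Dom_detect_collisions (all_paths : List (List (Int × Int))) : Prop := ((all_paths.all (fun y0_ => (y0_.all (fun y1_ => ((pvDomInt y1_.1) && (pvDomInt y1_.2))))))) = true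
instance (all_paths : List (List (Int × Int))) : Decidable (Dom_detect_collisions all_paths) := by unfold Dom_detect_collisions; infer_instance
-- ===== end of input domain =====

-- B builds a dict of drone-id groups per (node,t) key in one pass, then derives collisions and the
-- crashed count from the groups in a second pass — an alternative decomposition, same cost.

-- ===== PORT A =====
-- literal port of A: single pass keeping the last occupant per key; int(t) = t since t : Int
def detect_collisions (all_paths : List (List (Int × Int))) : Int × Int :=
  let st :=
    (PySem.List.enumerate all_paths).foldl
      (fun (st : PySem.Dict (Int × Int) Int × Int × PySem.Set Int) dp =>
        if dp.2 = [] then st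
        else
          dp.2.foldl
            (fun st nt =>
              let key := (nt.1, nt.2)
              match st.1.get? key with
              | some prev => (st.1.insert key dp.1, st.2.1 + 1,
                              PySem.Set.add (PySem.Set.add st.2.2 dp.1) prev)
              | none => (st.1.insert key dp.1, st.2.1, st.2.2))
            st)
      (PySem.Dict.empty, 0, PySem.Set.empty)
  (st.2.1, PySem.Set.len st.2.2)

-- ===== PORT B =====
-- literal port of Source B: groups.setdefault(key, []).append(drone_id) is Dict.modify key [] (· ++ [drone_id])
def detect_collisions_alt (all_paths : List (List (Int × Int))) : Int × Int :=
  let groups :=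
    (PySem.List.enumerate all_paths).foldl
      (fun (g : PySem.Dict (Int × Int) (List Int)) dp =>
        if dp.2 = [] then g
        else dp.2.foldl (fun g nt => g.modify (nt.1, nt.2) [] (· ++ [dp.1])) g)
      PySem.Dict.empty
  let res :=
    groups.values.foldl
      (fun (acc : Int × PySem.Set Int) ids =>
        (acc.1 + ((ids.length : Int) - 1),
         if ids.length > 1 then PySem.Set.update acc.2 ids else acc.2))
      (0, PySem.Set.empty)
  (res.1, PySem.Set.len res.2)

-- ===== PRECONDITION & SPEC =====
def Spec_detect_collisions (all_paths : List (List (Int × Int))) (out : Int × Int) : Prop := out = detect_collisions_alt all_paths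
instance (all_paths : List (List (Int × Int))) (out : Int × Int) : Decidable (Spec_detect_collisions all_paths out) := by unfold Spec_detect_collisions; infer_instance

-- ===== CLAIM (what is proved, stated in full; the proofs are below) =====
def Claim_equal_detect_collisions : Prop := ∀ (all_paths : List (List (Int × Int))), Dom_detect_collisions all_paths → Spec_detect_collisions all_paths (detect_collisions all_paths)

-- ===== LEMMAS AND PROOFS =====

-- the stream of (key, drone_id) events, in traversal order
def dcEv (all_paths : List (List (Int × Int))) : List ((Int × Int) × Int) :=
  (PySem.List.enumerate all_paths).flatMap (fun dp => dp.2.map (fun nt => (nt, dp.1)))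

-- the group of drone ids hitting key k
def dcGrp (ev : List ((Int × Int) × Int)) (k : Int × Int) : List Int :=
  (ev.filter (fun p => p.1 == k)).map (·.2)

def dcAstep (st : PySem.Dict (Int × Int) Int × Int × PySem.Set Int)
    (p : (Int × Int) × Int) : PySem.Dict (Int × Int) Int × Int × PySem.Set Int :=
  match st.1.get? p.1 with
  | some prev => (st.1.insert p.1 p.2, st.2.1 + 1,
                  PySem.Set.add (PySem.Set.add st.2.2 p.2) prev)
  | none => (st.1.insert p.1 p.2, st.2.1, st.2.2)

def dcAstate (ev : List ((Int × Int) × Int)) :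
    PySem.Dict (Int × Int) Int × Int × PySem.Set Int :=
  ev.foldl dcAstep (PySem.Dict.empty, 0, PySem.Set.empty)

lemma foldl_flatMap {α β γ : Type} (l : List α) (f : α → List β) (g : γ → β → γ) (init : γ) :
    (l.flatMap f).foldl g init = l.foldl (fun acc x => (f x).foldl g acc) init := by
  induction l generalizing init with
  | nil => rfl
  | cons a l ih => simp [List.flatMap_cons, List.foldl_append, ih]

lemma A_as_ev (all_paths : List (List (Int × Int))) :
    detect_collisions all_paths =
      ((dcAstate (dcEv all_paths)).2.1, PySem.Set.len (dcAstate (dcEv all_paths)).2.2) := by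
  unfold detect_collisions dcAstate dcEv
  rw [foldl_flatMap]
  refine congrArg (fun st : PySem.Dict (Int × Int) Int × Int × PySem.Set Int =>
    (st.2.1, PySem.Set.len st.2.2)) ?_
  apply List.foldl_ext
  intro st dp _
  rw [List.foldl_map]
  by_cases h : dp.2 = []
  · simp [h]
  · simp only [if_neg h]
    rfl

lemma B_as_ev (all_paths : List (List (Int × Int))) :
    detect_collisions_alt all_paths =
      (((((dcEv all_paths).foldl
            (fun (g : PySem.Dict (Int × Int) (List Int)) p => g.modify p.1 [] (· ++ [p.2]))
            PySem.Dict.empty).values.foldl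
          (fun (acc : Int × PySem.Set Int) ids =>
            (acc.1 + ((ids.length : Int) - 1),
             if ids.length > 1 then PySem.Set.update acc.2 ids else acc.2))
          (0, PySem.Set.empty)).1),
       PySem.Set.len ((((dcEv all_paths).foldl
            (fun (g : PySem.Dict (Int × Int) (List Int)) p => g.modify p.1 [] (· ++ [p.2]))
            PySem.Dict.empty).values.foldl
          (fun (acc : Int × PySem.Set Int) ids =>
            (acc.1 + ((ids.length : Int) - 1),
             if ids.length > 1 then PySem.Set.update acc.2 ids else acc.2))
          (0, PySem.Set.empty)).2)) := by
  unfold detect_collisions_alt dcEv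
  rw [foldl_flatMap]
  refine congrArg (fun groups : PySem.Dict (Int × Int) (List Int) =>
    ((groups.values.foldl
        (fun (acc : Int × PySem.Set Int) ids =>
          (acc.1 + ((ids.length : Int) - 1),
           if ids.length > 1 then PySem.Set.update acc.2 ids else acc.2))
        (0, PySem.Set.empty)).1,
     PySem.Set.len (groups.values.foldl
        (fun (acc : Int × PySem.Set Int) ids =>
          (acc.1 + ((ids.length : Int) - 1),
           if ids.length > 1 then PySem.Set.update acc.2 ids else acc.2))
        (0, PySem.Set.empty)).2)) ?_
  apply List.foldl_ext
  intro g dp _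
  rw [List.foldl_map]
  by_cases h : dp.2 = []
  · simp [h]
  · simp only [if_neg h]

-- distinct keys of the event stream, in first-occurrence order
def dcK (ev : List ((Int × Int) × Int)) : PySem.Set (Int × Int) :=
  PySem.Set.ofList (ev.map (·.1))

lemma dcAstate_concat (ev : List ((Int × Int) × Int)) (e : (Int × Int) × Int) :
    dcAstate (ev ++ [e]) = dcAstep (dcAstate ev) e := by
  simp [dcAstate, List.foldl_append]

lemma dcGrp_concat (ev : List ((Int × Int) × Int)) (e : (Int × Int) × Int) (k : Int × Int) :
    dcGrp (ev ++ [e]) k = if e.1 = k then dcGrp ev k ++ [e.2] else dcGrp ev k := by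
  by_cases h : e.1 = k <;> simp [dcGrp, List.filter_append, h]

lemma dcGrp_eq_nil_iff (ev : List ((Int × Int) × Int)) (k : Int × Int) :
    dcGrp ev k = [] ↔ k ∉ ev.map (·.1) := by
  simp only [dcGrp, List.map_eq_nil_iff, List.filter_eq_nil_iff, List.mem_map]
  constructor
  · rintro h ⟨p, hp, rfl⟩
    exact h p hp (by simp)
  · intro h p hp hpk
    exact h ⟨p, hp, by simpa using hpk⟩

lemma mem_dcK (ev : List ((Int × Int) × Int)) (k : Int × Int) :
    k ∈ dcK ev ↔ k ∈ ev.map (·.1) := PySem.Set.mem_ofList _ _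

lemma dcK_concat (ev : List ((Int × Int) × Int)) (e : (Int × Int) × Int) :
    dcK (ev ++ [e]) = PySem.Set.add (dcK ev) e.1 := by
  simp [dcK, PySem.Set.ofList_append_singleton]

lemma dcA_invariant (ev : List ((Int × Int) × Int)) :
    (∀ k, (dcAstate ev).1.get? k = (dcGrp ev k).getLast?) ∧
    (dcAstate ev).2.1 = (ev.length : Int) - ((dcK ev).length : Int) ∧
    (∀ x, x ∈ (dcAstate ev).2.2 ↔ ∃ k, 2 ≤ (dcGrp ev k).length ∧ x ∈ dcGrp ev k) ∧
    (dcAstate ev).2.2.Nodup := by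
  induction ev using List.reverseRecOn with
  | nil =>
    refine ⟨fun k => ?_, by simp [dcAstate, dcK], fun x => ?_, by simp [dcAstate]⟩
    · simp [dcAstate, dcGrp, PySem.Dict.get?_empty]
    · simp [dcAstate, dcGrp, PySem.Set.empty]
  | append_singleton ev e ih =>
    obtain ⟨hocc, hcol, hmem, hnd⟩ := ih
    rw [dcAstate_concat]
    cases hlast : (dcGrp ev e.1).getLast? with
    | none =>
      -- key unseen: no collision
      have hnil : dcGrp ev e.1 = [] := by
        cases h : dcGrp ev e.1 with
        | nil => rfl
        | cons a l => rw [h] at hlast; simp [List.getLast?] at hlast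
      have hnotmem : e.1 ∉ ev.map (·.1) := (dcGrp_eq_nil_iff ev e.1).mp hnil
      have hstep : dcAstep (dcAstate ev) e =
          ((dcAstate ev).1.insert e.1 e.2, (dcAstate ev).2.1, (dcAstate ev).2.2) := by
        unfold dcAstep
        rw [hocc e.1, hlast]
      rw [hstep]
      refine ⟨fun k => ?_, ?_, fun x => ?_, hnd⟩
      · rw [PySem.Dict.get?_insert, dcGrp_concat]
        by_cases h : e.1 = k
        · subst h; simp [hnil]
        · simp [h, Ne.symm h, hocc k]
      · rw [dcK_concat, PySem.Set.add_of_not_mem (by rwa [mem_dcK])]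
        simp only [List.length_append, List.length_singleton]
        rw [hcol]; push_cast; ring
      · rw [hmem x]
        constructor
        · rintro ⟨k, h2, hx⟩
          refine ⟨k, ?_, ?_⟩ <;> rw [dcGrp_concat] <;> split <;> simp_all
        · rintro ⟨k, h2, hx⟩
          rw [dcGrp_concat] at h2 hx
          by_cases h : e.1 = k
          · subst h
            rw [if_pos rfl] at h2 hx
            simp [hnil] at h2
          · rw [if_neg h] at h2 hx
            exact ⟨k, h2, hx⟩
    | some prev =>
      have hne : dcGrp ev e.1 ≠ [] := by
        intro h; rw [h] at hlast; simp at hlast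
      have hmemK : e.1 ∈ dcK ev := by
        rw [mem_dcK]
        by_contra h
        exact hne ((dcGrp_eq_nil_iff ev e.1).mpr h)
      have hprev : prev ∈ dcGrp ev e.1 := List.mem_of_getLast? hlast
      have hstep : dcAstep (dcAstate ev) e =
          ((dcAstate ev).1.insert e.1 e.2, (dcAstate ev).2.1 + 1,
           PySem.Set.add (PySem.Set.add (dcAstate ev).2.2 e.2) prev) := by
        unfold dcAstep
        rw [hocc e.1, hlast]
      rw [hstep]
      refine ⟨fun k => ?_, ?_, fun x => ?_, ?_⟩
      · rw [PySem.Dict.get?_insert, dcGrp_concat]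
        by_cases h : e.1 = k
        · subst h; simp
        · simp [h, Ne.symm h, hocc k]
      · rw [dcK_concat, PySem.Set.add_of_mem hmemK]
        simp only [List.length_append, List.length_singleton]
        rw [hcol]; push_cast; ring
      · rw [PySem.Set.mem_add, PySem.Set.mem_add, hmem x]
        constructor
        · rintro ((⟨k, h2, hx⟩ | rfl) | rfl)
          · refine ⟨k, ?_, ?_⟩ <;> rw [dcGrp_concat] <;> split
            · simp only [List.length_append, List.length_singleton]; omega
            · exact h2
            · exact List.mem_append_left _ hx
            · exact hx
          · refine ⟨e.1, ?_, ?_⟩ <;> rw [dcGrp_concat, if_pos rfl]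
            · have := List.length_pos_of_ne_nil hne
              simp; omega
            · simp
          · refine ⟨e.1, ?_, ?_⟩ <;> rw [dcGrp_concat, if_pos rfl]
            · have := List.length_pos_of_ne_nil hne
              simp; omega
            · simp [hprev]
        · rintro ⟨k, h2, hx⟩
          rw [dcGrp_concat] at h2 hx
          by_cases h : e.1 = k
          · subst h
            rw [if_pos rfl] at h2 hx
            rcases List.mem_append.mp hx with hx | hx
            · by_cases hlen : 2 ≤ (dcGrp ev e.1).length
              · exact Or.inl (Or.inl ⟨e.1, hlen, hx⟩)
              · -- singleton group: its element is prev
                have h1 : (dcGrp ev e.1).length = 1 := by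
                  have := List.length_pos_of_ne_nil hne
                  omega
                obtain ⟨a, ha⟩ := List.length_eq_one_iff.mp h1
                rw [ha] at hlast hx
                simp at hlast hx
                subst hlast; subst hx
                exact Or.inr rfl
            · simp at hx
              subst hx
              exact Or.inl (Or.inr rfl)
          · rw [if_neg h] at h2 hx
            exact Or.inl (Or.inl ⟨k, h2, hx⟩)
      · exact PySem.Set.nodup_add _ _ (PySem.Set.nodup_add _ _ hnd)

def dcCrashFold (gs : List (List Int)) (s : PySem.Set Int) : PySem.Set Int :=
  gs.foldl (fun s ids => if ids.length > 1 then PySem.Set.update s ids else s) s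

lemma dcBfold (gs : List (List Int)) (c : Int) (s : PySem.Set Int) :
    gs.foldl
      (fun (acc : Int × PySem.Set Int) ids =>
        (acc.1 + ((ids.length : Int) - 1),
         if ids.length > 1 then PySem.Set.update acc.2 ids else acc.2))
      (c, s)
    = (c + (gs.map (fun ids => ((ids.length : Int) - 1))).sum, dcCrashFold gs s) := by
  induction gs generalizing c s with
  | nil => simp [dcCrashFold]
  | cons g gs ih => simp [dcCrashFold, List.foldl_cons, ih]; ring

lemma mem_dcCrashFold (gs : List (List Int)) (s : PySem.Set Int) (x : Int) :
    x ∈ dcCrashFold gs s ↔ x ∈ s ∨ ∃ ids ∈ gs, 1 < ids.length ∧ x ∈ ids := by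
  induction gs generalizing s with
  | nil => simp [dcCrashFold]
  | cons g gs ih =>
    simp only [dcCrashFold, List.foldl_cons] at *
    rw [ih]
    by_cases h : g.length > 1
    · rw [if_pos h, PySem.Set.mem_update]
      constructor
      · rintro ((hs | hg) | ⟨ids, hids, hlen, hx⟩)
        · exact Or.inl hs
        · exact Or.inr ⟨g, List.mem_cons_self, h, hg⟩
        · exact Or.inr ⟨ids, List.mem_cons_of_mem _ hids, hlen, hx⟩
      · rintro (hs | ⟨ids, hids, hlen, hx⟩)
        · exact Or.inl (Or.inl hs)
        · rcases List.mem_cons.mp hids with rfl | hids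
          · exact Or.inl (Or.inr hx)
          · exact Or.inr ⟨ids, hids, hlen, hx⟩
    · rw [if_neg h]
      constructor
      · rintro (hs | ⟨ids, hids, hlen, hx⟩)
        · exact Or.inl hs
        · exact Or.inr ⟨ids, List.mem_cons_of_mem _ hids, hlen, hx⟩
      · rintro (hs | ⟨ids, hids, hlen, hx⟩)
        · exact Or.inl hs
        · rcases List.mem_cons.mp hids with rfl | hids
          · exact absurd hlen h
          · exact Or.inr ⟨ids, hids, hlen, hx⟩

lemma nodup_dcCrashFold (gs : List (List Int)) (s : PySem.Set Int) (h : s.Nodup) :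
    (dcCrashFold gs s).Nodup := by
  induction gs generalizing s with
  | nil => exact h
  | cons g gs ih =>
    simp only [dcCrashFold, List.foldl_cons] at *
    split
    · exact ih _ (PySem.Set.nodup_update _ _ h)
    · exact ih _ h

lemma dcGrp_cons (p : (Int × Int) × Int) (ev : List ((Int × Int) × Int)) (k : Int × Int) :
    dcGrp (p :: ev) k = if p.1 = k then p.2 :: dcGrp ev k else dcGrp ev k := by
  by_cases h : p.1 = k <;> simp [dcGrp, h]

lemma dcSumIte (K : List (Int × Int)) (a : Int × Int) (hnd : K.Nodup) (ha : a ∈ K) :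
    (K.map (fun k => if a = k then (1 : Int) else 0)).sum = 1 := by
  induction K with
  | nil => simp at ha
  | cons b K ih =>
    rcases List.mem_cons.mp ha with rfl | ha
    · have : (K.map (fun k => if a = k then (1 : Int) else 0)).sum = 0 := by
        apply List.sum_eq_zero
        intro x hx
        simp only [List.mem_map] at hx
        obtain ⟨k, hk, rfl⟩ := hx
        have : a ≠ k := fun h => (List.nodup_cons.mp hnd).1 (h ▸ hk)
        simp [this]
      simp [this]
    · have hne : a ≠ b := fun h => (List.nodup_cons.mp hnd).1 (h ▸ ha)
      simp [hne, ih (List.nodup_cons.mp hnd).2 ha]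

lemma dcSumLen (K : List (Int × Int)) (ev : List ((Int × Int) × Int)) (hnd : K.Nodup)
    (hcov : ∀ p ∈ ev, p.1 ∈ K) :
    (K.map (fun k => ((dcGrp ev k).length : Int))).sum = (ev.length : Int) := by
  induction ev with
  | nil => simp [dcGrp]
  | cons p ev ih =>
    have hcov' : ∀ q ∈ ev, q.1 ∈ K := fun q hq => hcov q (List.mem_cons_of_mem _ hq)
    have heq : (fun k => ((dcGrp (p :: ev) k).length : Int)) =
        (fun k => (if p.1 = k then (1 : Int) else 0) + ((dcGrp ev k).length : Int)) := by
      funext k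
      rw [dcGrp_cons]
      by_cases h : p.1 = k <;> (simp [h]; try omega)
    rw [heq, List.sum_map_add, dcSumIte K p.1 hnd (hcov p List.mem_cons_self), ih hcov']
    simp only [List.length_cons]
    push_cast
    ring

-- ===== VERDICT (by name: the statement is the Claim_ definition above) =====
theorem detect_collisions_spec : Claim_equal_detect_collisions := by
  unfold Claim_equal_detect_collisions Spec_detect_collisions
  intro all_paths _
  rw [A_as_ev, B_as_ev]
  obtain ⟨hocc, hcol, hmem, hnd⟩ := dcA_invariant (dcEv all_paths)
  set ev := dcEv all_paths with hev
  -- facts about B's groups dict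
  have hkeys : (ev.foldl
      (fun (g : PySem.Dict (Int × Int) (List Int)) p => g.modify p.1 [] (· ++ [p.2]))
      PySem.Dict.empty).keys = dcK ev := by
    rw [PySem.Dict.keys_foldl_modify_key ev (·.1) [] (fun d x => (· ++ [x.2])) PySem.Dict.empty]
    rw [PySem.Dict.keys_empty, PySem.Set.update_nil_left]
    rfl
  have hndk : (ev.foldl
      (fun (g : PySem.Dict (Int × Int) (List Int)) p => g.modify p.1 [] (· ++ [p.2]))
      PySem.Dict.empty).keys.Nodup := by
    rw [hkeys]
    exact PySem.Set.nodup_ofList _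
  have hgetD : ∀ k, (ev.foldl
      (fun (g : PySem.Dict (Int × Int) (List Int)) p => g.modify p.1 [] (· ++ [p.2]))
      PySem.Dict.empty).getD k [] = dcGrp ev k := by
    intro k
    rw [PySem.Dict.getD_foldl_modify_append ev PySem.Dict.empty k]
    simp [dcGrp, PySem.Dict.getD_empty]
  have hvals : (ev.foldl
      (fun (g : PySem.Dict (Int × Int) (List Int)) p => g.modify p.1 [] (· ++ [p.2]))
      PySem.Dict.empty).values = (dcK ev).map (fun k => dcGrp ev k) := by
    rw [PySem.Dict.values_eq_map_keys _ hndk []]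
    rw [hkeys]
    exact List.map_congr_left (fun k _ => hgetD k)
  rw [hvals, dcBfold]
  -- collisions agree
  have hKnd : (dcK ev).Nodup := PySem.Set.nodup_ofList _
  have hKcov : ∀ p ∈ ev, p.1 ∈ dcK ev := by
    intro p hp
    rw [mem_dcK]
    exact List.mem_map_of_mem hp
  have hcols : (dcAstate ev).2.1 =
      0 + (((dcK ev).map (fun k => dcGrp ev k)).map (fun ids => ((ids.length : Int) - 1))).sum := by
    rw [hcol, List.map_map]
    rw [Function.comp_def]
    have h2 : (dcK ev).map (fun k => ((dcGrp ev k).length : Int) - 1) =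
        (dcK ev).map (fun k => ((dcGrp ev k).length : Int) + (-1)) := by
      apply List.map_congr_left; intro k _; ring
    rw [h2, List.sum_map_add, dcSumLen (dcK ev) ev hKnd hKcov]
    simp
    ring
  -- crashed sets agree as sets, hence same length
  have hcrash : PySem.Set.len (dcAstate ev).2.2 =
      PySem.Set.len (dcCrashFold ((dcK ev).map (fun k => dcGrp ev k)) PySem.Set.empty) := by
    have hsame : ∀ x, x ∈ (dcAstate ev).2.2 ↔
        x ∈ dcCrashFold ((dcK ev).map (fun k => dcGrp ev k)) PySem.Set.empty := by
      intro x
      rw [hmem x, mem_dcCrashFold]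
      simp only [PySem.Set.empty, List.not_mem_nil, false_or, List.mem_map]
      constructor
      · rintro ⟨k, h2, hx⟩
        have hne : dcGrp ev k ≠ [] := by
          intro h; rw [h] at h2; simp at h2
        have hkK : k ∈ dcK ev := by
          rw [mem_dcK]
          by_contra h
          exact hne ((dcGrp_eq_nil_iff ev k).mpr h)
        exact ⟨dcGrp ev k, ⟨k, hkK, rfl⟩, by omega, hx⟩
      · rintro ⟨ids, ⟨k, hk, rfl⟩, hlen, hx⟩
        exact ⟨k, by omega, hx⟩
    have hnd2 : (dcCrashFold ((dcK ev).map (fun k => dcGrp ev k)) PySem.Set.empty).Nodup :=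
      nodup_dcCrashFold _ _ (by simp [PySem.Set.empty])
    have hperm := (List.perm_ext_iff_of_nodup hnd hnd2).mpr hsame
    simp [PySem.Set.len, hperm.length_eq]
  exact Prod.ext (by simpa using hcols) hcrash
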